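-- pv_equiv track=rewrite | github.com/LauraFlorey/The-Jinx-Memory-System | memory-engine/promoter.py | append_to_section
-- ===== SOURCE A (Python) =====
-- def append_to_section(
--     original: str, section: str | None, content: str
-- ) -> str:
--     entry = content.strip()
--     if not entry:
--         return original
--     if section is None:
--         return original.rstrip() + f"\n{entry}\n"
--
--     lines = original.splitlines()
--     section_header = f"## {section.strip()}"
--     start_index = next(
--         (index for index, line in enumerate(lines) if line.strip() == section_header),
--         None,
--     )
--     if start_index is None:
--         suffix = f"\n\n{section_header}\n{entry}\n"
--         return original.rstrip() + suffix
--
--     insert_index = len(lines)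
--     for index in range(start_index + 1, len(lines)):
--         if lines[index].startswith("## "):
--             insert_index = index
--             break
--
--     updated_lines = list(lines)
--     insertion: list[str] = []
--     if insert_index > 0 and updated_lines[insert_index - 1].strip():
--         insertion.append("")
--     insertion.append(entry)
--     if insert_index < len(updated_lines) and updated_lines[insert_index].strip():
--         insertion.append("")
--     updated_lines[insert_index:insert_index] = insertion
--     return "\n".join(updated_lines).rstrip() + "\n"
-- ===== SOURCE B (Python) =====
-- def append_to_section(
--     original: str, section: str | None, content: str
-- ) -> str:
--     entry = content.strip()
--     if not entry:
--         return original
--     if section is None: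
--         return original.rstrip() + f"\n{entry}\n"
--
--     header = f"## {section.strip()}"
--     out: list[str] = []
--     state = 0  # 0 = searching for the header, 1 = inside the section, 2 = done
--     for line in original.splitlines():
--         if state == 0:
--             if line.strip() == header:
--                 state = 1
--         elif state == 1:
--             if line.startswith("## "):
--                 if out[-1].strip():
--                     out.append("")
--                 out.append(entry)
--                 if line.strip():
--                     out.append("")
--                 state = 2
--         out.append(line)
--     if state == 0:
--         return original.rstrip() + f"\n\n{header}\n{entry}\n"
--     if state == 1:
--         if out[-1].strip():
--             out.append("")
--         out.append(entry)
--     return "\n".join(out).rstrip() + "\n"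
-- ===== Notes on version B (the rewrite author's own statement) =====
-- stated objective: alternative
-- what changed: Replaces A's three-phase index arithmetic (enumerate to find the header index, a second indexed scan for the next '## ' header, then an in-place slice splice into a copy of the lines) by a single state-machine pass over the lines that emits the insertion in place.
import Mathlib
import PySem

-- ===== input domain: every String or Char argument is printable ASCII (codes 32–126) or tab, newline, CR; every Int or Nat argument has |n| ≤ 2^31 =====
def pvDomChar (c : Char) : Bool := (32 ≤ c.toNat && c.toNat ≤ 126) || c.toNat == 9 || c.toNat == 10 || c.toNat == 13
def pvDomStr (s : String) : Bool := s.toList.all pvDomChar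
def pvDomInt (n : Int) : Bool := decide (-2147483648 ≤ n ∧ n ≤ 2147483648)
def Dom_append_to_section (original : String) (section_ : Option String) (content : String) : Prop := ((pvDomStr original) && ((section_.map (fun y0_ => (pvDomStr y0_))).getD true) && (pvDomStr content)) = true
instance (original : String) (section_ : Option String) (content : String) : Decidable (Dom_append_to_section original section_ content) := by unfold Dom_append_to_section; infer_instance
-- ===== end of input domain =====

-- B replaces A's index hunting and in-place slice splice by a single state-machine pass over the
-- lines that emits the insertion where it belongs (objective: alternative, same cost).

-- ===== PORT A =====
-- `for index in range(start_index + 1, len(lines)): if lines[index].startswith("## "): insert_index = index; break`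
-- (`insert_index` stays `len(lines)` when no later header exists); index access is in range, so getD is exact
def findInsert (lines : List String) (i : Nat) : Nat :=
  if h : i < lines.length then
    if PySem.Str.startswith lines[i] "## " then i else findInsert lines (i + 1)
  else lines.length
termination_by lines.length - i

def append_to_section (original : String) (section_ : Option String) (content : String) : String :=
  let entry := PySem.Str.strip content
  if entry = "" then original
  else
    match section_ with
    | none => PySem.Str.rstrip original ++ "\n" ++ entry ++ "\n"
    | some s =>
      let lines := PySem.Str.splitlines original
      let header := "## " ++ PySem.Str.strip s
      -- `next((index for index, line in enumerate(lines) if line.strip() == section_header), None)`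
      match lines.findIdx? (fun line => PySem.Str.strip line == header) with
      | none => PySem.Str.rstrip original ++ "\n\n" ++ header ++ "\n" ++ entry ++ "\n"
      | some start =>
        let ins := findInsert lines (start + 1)
        let insertion : List String :=
          (if 0 < ins ∧ PySem.Str.strip (lines.getD (ins - 1) "") ≠ "" then [""] else [])
          ++ [entry]
          ++ (if ins < lines.length ∧ PySem.Str.strip (lines.getD ins "") ≠ "" then [""] else [])
        -- `updated_lines[insert_index:insert_index] = insertion`
        let updated := lines.take ins ++ insertion ++ lines.drop ins
        PySem.Str.rstrip (PySem.Str.join "\n" updated) ++ "\n"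

-- ===== PORT B =====
-- state 1 of Source B's loop (inside the section): `prev` is the last line already emitted (`out[-1]`)
def altInside (entry : String) (prev : String) : List String → List String
  | [] => (if PySem.Str.strip prev ≠ "" then [""] else []) ++ [entry]
  | l :: rest =>
    if PySem.Str.startswith l "## " then
      (if PySem.Str.strip prev ≠ "" then [""] else []) ++ [entry]
      ++ (if PySem.Str.strip l ≠ "" then [""] else []) ++ l :: rest
    else l :: altInside entry l rest

-- state 0 of Source B's loop (searching for the header); `none` = loop ended still in state 0
def altSearch (header entry : String) : List String → Option (List String)
  | [] => none
  | l :: rest =>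
    if PySem.Str.strip l == header then some (l :: altInside entry l rest)
    else
      match altSearch header entry rest with
      | none => none
      | some r => some (l :: r)

def append_to_section_alt (original : String) (section_ : Option String) (content : String) : String :=
  let entry := PySem.Str.strip content
  if entry = "" then original
  else
    match section_ with
    | none => PySem.Str.rstrip original ++ "\n" ++ entry ++ "\n"
    | some s =>
      let header := "## " ++ PySem.Str.strip s
      match altSearch header entry (PySem.Str.splitlines original) with
      | none => PySem.Str.rstrip original ++ "\n\n" ++ header ++ "\n" ++ entry ++ "\n"
      | some out => PySem.Str.rstrip (PySem.Str.join "\n" out) ++ "\n"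

-- ===== PRECONDITION & SPEC =====
def Spec_append_to_section (original : String) (section_ : Option String) (content : String) (out : String) : Prop := out = append_to_section_alt original section_ content
instance (original : String) (section_ : Option String) (content : String) (out : String) : Decidable (Spec_append_to_section original section_ content out) := by unfold Spec_append_to_section; infer_instance

-- ===== CLAIM (what is proved, stated in full; the proofs are below) =====
def Claim_equal_append_to_section : Prop := ∀ (original : String) (section_ : Option String) (content : String), Dom_append_to_section original section_ content → Spec_append_to_section original section_ content (append_to_section original section_ content)

-- ===== LEMMAS AND PROOFS =====

theorem findInsert_cons_succ (d : Nat) (x : String) (xs : List String) (i : Nat)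
    (hd : xs.length - i ≤ d) :
    findInsert (x :: xs) (i + 1) = findInsert xs i + 1 := by
  induction d generalizing i with
  | zero =>
    have h1 : ¬ (i + 1 < (x :: xs).length) := by simp; omega
    have h2 : ¬ (i < xs.length) := by omega
    rw [findInsert, dif_neg h1, findInsert, dif_neg h2]
    simp
  | succ d ih =>
    by_cases h : i < xs.length
    · conv_lhs => rw [findInsert]
      conv_rhs => rw [findInsert]
      rw [dif_pos (show i + 1 < (x :: xs).length by simp; omega), dif_pos h]
      simp only [List.getElem_cons_succ]
      by_cases hs : PySem.Str.startswith (xs[i]'h) "## " = true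
      · rw [if_pos hs, if_pos hs]
      · rw [if_neg hs, if_neg hs]
        exact ih (i + 1) (by omega)
    · have h1 : ¬ (i + 1 < (x :: xs).length) := by simp; omega
      rw [findInsert, dif_neg h1, findInsert, dif_neg h]
      simp

theorem findInsert_off (j : Nat) (lines : List String) (hj : j ≤ lines.length) :
    findInsert lines j = j + findInsert (lines.drop j) 0 := by
  induction j generalizing lines with
  | zero => simp
  | succ j ih =>
    cases lines with
    | nil => simp at hj
    | cons x xs =>
      have hx : j ≤ xs.length := by simpa using hj
      rw [findInsert_cons_succ xs.length x xs j (by omega), ih xs hx]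
      simp [List.drop_succ_cons]
      omega

theorem altInside_eq (entry : String) : ∀ (suf : List String) (prev : String),
    altInside entry prev suf =
      suf.take (findInsert suf 0)
      ++ (if PySem.Str.strip ((prev :: suf).getD (findInsert suf 0) "") ≠ "" then [""] else [])
      ++ [entry]
      ++ (if findInsert suf 0 < suf.length ∧ PySem.Str.strip (suf.getD (findInsert suf 0) "") ≠ "" then [""] else [])
      ++ suf.drop (findInsert suf 0) := by
  intro suf
  induction suf with
  | nil =>
    intro prev
    rw [findInsert]
    simp [altInside, List.getD]
  | cons l rest ih =>
    intro prev
    rw [findInsert, dif_pos (show 0 < (l :: rest).length by simp)]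
    simp only [List.getElem_cons_zero]
    by_cases hs : PySem.Str.startswith l "## " = true
    · simp only [hs, if_true]
      have hs' : PySem.Chars.startswith l.toList ('#' :: '#' :: ' ' :: []) = true := by
        simpa using hs
      simp [altInside, hs', List.getD]
    · simp only [hs, Bool.false_eq_true, if_false]
      have hshift := findInsert_cons_succ rest.length l rest 0 (by omega)
      rw [hshift]
      simp only [altInside, hs, Bool.false_eq_true, if_false]
      rw [ih l]
      simp [List.take_succ_cons, List.drop_succ_cons]

theorem altSearch_none (header entry : String) : ∀ (lines : List String),
    List.findIdx? (fun line => PySem.Str.strip line == header) lines = none →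
    altSearch header entry lines = none := by
  intro lines
  induction lines with
  | nil => intro _; rfl
  | cons l rest ih =>
    intro h
    rw [List.findIdx?_cons] at h
    by_cases hp : (PySem.Str.strip l == header) = true
    · simp [hp] at h
    · simp only [hp, Bool.false_eq_true, if_false] at h
      have := ih (by cases hfi : List.findIdx? (fun line => PySem.Str.strip line == header) rest <;> simp [hfi] at h ⊢)
      simp [altSearch, hp, this]

theorem altSearch_some (header entry : String) : ∀ (lines : List String) (k : Nat),
    List.findIdx? (fun line => PySem.Str.strip line == header) lines = some k →
    k < lines.length ∧
    altSearch header entry lines =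
      some (lines.take k ++ (lines.getD k "") :: altInside entry (lines.getD k "") (lines.drop (k + 1))) := by
  intro lines
  induction lines with
  | nil => intro k h; simp at h
  | cons l rest ih =>
    intro k h
    rw [List.findIdx?_cons] at h
    by_cases hp : (PySem.Str.strip l == header) = true
    · simp only [hp, if_true] at h
      cases h
      refine ⟨by simp, ?_⟩
      simp [altSearch, hp, List.getD]
    · simp only [hp, Bool.false_eq_true, if_false] at h
      cases hfi : List.findIdx? (fun line => PySem.Str.strip line == header) rest with
      | none => rw [hfi] at h; simp at h
      | some k' =>
        rw [hfi] at h
        simp only [Option.map_some] at h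
        cases h
        obtain ⟨hlt, heq⟩ := ih k' hfi
        refine ⟨by simp; omega, ?_⟩
        simp [altSearch, hp, heq, List.getD]

-- ===== VERDICT (by name: the statement is the Claim_ definition above) =====
theorem append_to_section_spec : Claim_equal_append_to_section := by
  intro original section_ content _
  unfold Spec_append_to_section append_to_section append_to_section_alt
  by_cases he : PySem.Str.strip content = ""
  · simp [he]
  · simp only [he, if_false]
    cases section_ with
    | none => rfl
    | some s =>
      simp only
      set entry := PySem.Str.strip content with hentry
      set lines := PySem.Str.splitlines original with hlines
      set header := "## " ++ PySem.Str.strip s with hheader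
      cases hfi : List.findIdx? (fun line => PySem.Str.strip line == header) lines with
      | none => rw [altSearch_none header entry lines hfi]
      | some k =>
        obtain ⟨hk, hsearch⟩ := altSearch_some header entry lines k hfi
        rw [hsearch]
        dsimp only
        have hoff : findInsert lines (k + 1) = (k + 1) + findInsert (lines.drop (k + 1)) 0 :=
          findInsert_off (k + 1) lines hk
        set suf := lines.drop (k + 1) with hsuf
        set m := findInsert suf 0 with hm
        set cur := lines[k]'hk with hcur
        have hgetk : lines.getD k "" = cur := by
          simp [List.getD, List.getElem?_eq_getElem hk, ← hcur]
        have hdropk : lines.drop k = cur :: suf := by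
          rw [List.drop_eq_getElem_cons hk]
        have hlen : lines.length = (k + 1) + suf.length := by
          rw [hsuf, List.length_drop]; omega
        have htake : lines.take (k + 1 + m) = lines.take k ++ cur :: suf.take m := by
          rw [List.take_add, List.take_add_one, List.getElem?_eq_getElem hk]
          simp [hsuf, ← hcur]
        have hgd1 : lines.getD (k + 1 + m - 1) "" = (cur :: suf).getD m "" := by
          have he : k + 1 + m - 1 = k + m := by omega
          have hq : lines[k + m]? = (cur :: suf)[m]? := by rw [← List.getElem?_drop, hdropk]
          rw [he]
          simp [List.getD, hq]
        have hgd2 : lines.getD (k + 1 + m) "" = suf.getD m "" := by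
          have hq : lines[k + 1 + m]? = suf[m]? := by rw [← List.getElem?_drop, hsuf]
          simp [List.getD, hq]
        have hdrop : lines.drop (k + 1 + m) = suf.drop m := by
          rw [hsuf, List.drop_drop]
        have h0 : 0 < k + 1 + m := by omega
        have hcond : (k + 1 + m < lines.length) ↔ (m < suf.length) := by omega
        rw [hoff, hgetk, altInside_eq entry suf cur, htake, hgd1, hgd2, hdrop]
        simp only [h0, true_and, hcond, List.append_assoc, List.cons_append, List.nil_append]
        rw [← hm]
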